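-- pv_equiv track=rewrite | github.com/qeedquan/challenges | codewars/triangle-of-multiples-easy-one.py | even_sums
-- ===== SOURCE A (Python) =====
-- def even_sums(n):
--     r = 0
--     for i in range(1, n + 1):
--         s = i**2
--         for j in range(i, s, i):
--             if j%2 == 0:
--                 r += j * 2
--         if s%2 == 0:
--             r += s
--     return r
-- ===== SOURCE B (Python) =====
-- def even_sums(n):
--     # Closed form per i: the inner multiples loop of A collapses to an
--     # arithmetic-series formula (i**3 for even i, i*(i*i-1)//2 for odd i).
--     r = 0
--     for i in range(1, n + 1):
--         if i % 2 == 0: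
--             r += i * i * i
--         else:
--             r += i * (i * i - 1) // 2
--     return r
-- ===== Notes on version B (the rewrite author's own statement) =====
-- stated objective: faster
-- what changed: replaced the inner loop over multiples of i (plus the even-square add) with a per-i arithmetic-series closed form: i^3 for even i, i*(i*i-1)//2 for odd i
import Mathlib
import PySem

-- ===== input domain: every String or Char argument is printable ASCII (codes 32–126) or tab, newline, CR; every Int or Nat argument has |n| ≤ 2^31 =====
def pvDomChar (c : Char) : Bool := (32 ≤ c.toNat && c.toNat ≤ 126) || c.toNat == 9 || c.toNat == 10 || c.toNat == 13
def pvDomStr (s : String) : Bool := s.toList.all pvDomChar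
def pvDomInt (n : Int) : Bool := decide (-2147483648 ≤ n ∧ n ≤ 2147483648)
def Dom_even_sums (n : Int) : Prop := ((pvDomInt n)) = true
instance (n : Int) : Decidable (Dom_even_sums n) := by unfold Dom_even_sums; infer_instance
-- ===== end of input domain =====

-- B replaces A's inner loop over multiples of i by a per-i closed form (faster).

-- ===== PORT A =====
def even_sums (n : Int) : Int :=
  (PySem.List.pyRange 1 (n + 1) 1).foldl (fun r i =>
    let s := i ^ 2
    let r' := (PySem.List.pyRange i s i).foldl
      (fun r j => if PySem.Int.mod j 2 = 0 then r + j * 2 else r) r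
    if PySem.Int.mod s 2 = 0 then r' + s else r') 0

-- ===== PORT B =====
def even_sums_alt (n : Int) : Int :=
  (PySem.List.pyRange 1 (n + 1) 1).foldl (fun r i =>
    if PySem.Int.mod i 2 = 0 then r + i * i * i
    else r + PySem.Int.floordiv (i * (i * i - 1)) 2) 0

-- ===== PRECONDITION & SPEC =====
def Spec_even_sums (n : Int) (out : Int) : Prop := out = even_sums_alt n
instance (n : Int) (out : Int) : Decidable (Spec_even_sums n out) := by unfold Spec_even_sums; infer_instance

-- ===== CLAIM (what is proved, stated in full; the proofs are below) =====
def Claim_equal_even_sums : Prop := ∀ (n : Int), Dom_even_sums n → Spec_even_sums n (even_sums n)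

-- ===== LEMMAS AND PROOFS =====

-- the sum A's inner loop accumulates, for even i
theorem pv_sum_even (i : Int) (h2 : i % 2 = 0) (K : Nat) :
    ((List.range K).map (fun (k : Nat) =>
        if (i + i * (k : Int)) % 2 = 0 then (i + i * (k : Int)) * 2 else 0)).sum
      = i * K * (K + 1) := by
  induction K with
  | zero => simp
  | succ K ih =>
    obtain ⟨c, hc⟩ : (2 : Int) ∣ i := Int.dvd_of_emod_eq_zero h2
    have hd : (i + i * (K : Int)) % 2 = 0 :=
      Int.emod_eq_zero_of_dvd ⟨c + c * K, by rw [hc]; ring⟩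
    rw [List.range_succ, List.map_append, List.sum_append, ih]
    simp only [List.map_cons, List.map_nil, List.sum_cons, List.sum_nil, hd]
    push_cast
    ring

-- the sum A's inner loop accumulates, for odd i
theorem pv_sum_odd (i : Int) (h2 : i % 2 = 1) (K : Nat) :
    ((List.range K).map (fun (k : Nat) =>
        if (i + i * (k : Int)) % 2 = 0 then (i + i * (k : Int)) * 2 else 0)).sum
      = 2 * i * ((K / 2 : Nat) : Int) * (((K / 2 : Nat) : Int) + 1) := by
  induction K with
  | zero => simp
  | succ K ih =>
    have hpar : (i + i * (K : Int)) % 2 = (1 + (K : Int)) % 2 := by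
      conv_lhs => rw [show i + i * (K : Int) = i * (1 + K) by ring, Int.mul_emod, h2]
      rw [one_mul, Int.emod_emod_of_dvd _ (dvd_refl 2)]
    rw [List.range_succ, List.map_append, List.sum_append, ih]
    simp only [List.map_cons, List.map_nil, List.sum_cons, List.sum_nil, hpar]
    by_cases hK : K % 2 = 0
    · -- K even: the new multiple i*(K+1) is odd, the term is 0
      have h1 : (1 + (K : Int)) % 2 = 1 := by omega
      have h2' : ((K + 1) / 2 : Nat) = (K / 2 : Nat) := by omega
      simp [h1, h2']
    · -- K odd: the new multiple i*(K+1) is even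
      have h1 : (1 + (K : Int)) % 2 = 0 := by omega
      set e : Nat := K / 2 with he
      have hK2 : (K : Int) = 2 * (e : Int) + 1 := by omega
      have h2' : ((K + 1) / 2 : Nat) = e + 1 := by omega
      rw [h2', h1]
      simp only [add_zero]
      push_cast
      rw [hK2]
      ring

-- the per-iteration bodies of A and B agree for every i ≥ 1
theorem pv_step_eq (i r : Int) (hi : 1 ≤ i) :
    (let s := i ^ 2
     let r' := (PySem.List.pyRange i s i).foldl
       (fun r j => if PySem.Int.mod j 2 = 0 then r + j * 2 else r) r
     if PySem.Int.mod s 2 = 0 then r' + s else r')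
    = (if PySem.Int.mod i 2 = 0 then r + i * i * i
       else r + PySem.Int.floordiv (i * (i * i - 1)) 2) := by
  have hpos : (0 : Int) < i := hi
  have hmod : ∀ a : Int, PySem.Int.mod a 2 = a % 2 := fun a =>
    PySem.Int.mod_eq_emod_of_pos (by norm_num)
  have hstep : ∀ (acc j : Int),
      (if PySem.Int.mod j 2 = 0 then acc + j * 2 else acc)
        = acc + (if j % 2 = 0 then j * 2 else 0) := by
    intro acc j; rw [hmod]; split_ifs <;> simp
  have hfold : (PySem.List.pyRange i (i ^ 2) i).foldl
      (fun r j => if PySem.Int.mod j 2 = 0 then r + j * 2 else r) r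
      = r + ((PySem.List.pyRange i (i ^ 2) i).map
          (fun j => if j % 2 = 0 then j * 2 else 0)).sum := by
    rw [PySem.List.foldl_congr_mem _ _ (fun acc j => acc + (if j % 2 = 0 then j * 2 else 0)) r
        (fun acc j _ => hstep acc j)]
    exact PySem.List.foldl_add _ _ _
  have hlen : (if i < i ^ 2 then ((i ^ 2 - i + i - 1) / i).toNat else 0) = (i - 1).toNat := by
    rcases eq_or_lt_of_le hi with h1 | h1
    · rw [if_neg (by nlinarith)]; omega
    · have hlt : i < i ^ 2 := by nlinarith
      rw [if_pos hlt]
      have heq : i ^ 2 - i + i - 1 = (i - 1) + i * (i - 1) := by ring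
      rw [heq, Int.add_mul_ediv_left _ _ (by omega), Int.ediv_eq_zero_of_lt (by omega) (by omega)]
      omega
  set K : Nat := (i - 1).toNat with hKdef
  have hKc : (K : Int) = i - 1 := by omega
  have hsum : ((PySem.List.pyRange i (i ^ 2) i).map
      (fun j => if j % 2 = 0 then j * 2 else 0)).sum
      = ((List.range K).map (fun (k : Nat) =>
          if (i + i * (k : Int)) % 2 = 0 then (i + i * (k : Int)) * 2 else 0)).sum := by
    rw [PySem.List.pyRange_of_pos _ _ hpos, hlen, List.map_map]
    rfl
  show (if PySem.Int.mod (i ^ 2) 2 = 0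
        then (PySem.List.pyRange i (i ^ 2) i).foldl
          (fun r j => if PySem.Int.mod j 2 = 0 then r + j * 2 else r) r + i ^ 2
        else (PySem.List.pyRange i (i ^ 2) i).foldl
          (fun r j => if PySem.Int.mod j 2 = 0 then r + j * 2 else r) r)
      = (if PySem.Int.mod i 2 = 0 then r + i * i * i
         else r + PySem.Int.floordiv (i * (i * i - 1)) 2)
  rw [hfold, hsum, hmod (i ^ 2), hmod i]
  rcases Int.emod_two_eq i with hp | hp
  · -- i even
    obtain ⟨c, hc⟩ : (2 : Int) ∣ i := Int.dvd_of_emod_eq_zero hp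
    have hs2 : i ^ 2 % 2 = 0 :=
      Int.emod_eq_zero_of_dvd ⟨2 * c * c, by rw [hc]; ring⟩
    rw [hs2, hp, if_pos rfl, if_pos rfl, pv_sum_even i hp K, hKc]
    ring
  · -- i odd
    set m : Int := i / 2 with hm
    have him : i = 2 * m + 1 := by omega
    have hs2 : i ^ 2 % 2 = 1 := by
      have hsq : i ^ 2 = 2 * (2 * m * m + 2 * m) + 1 := by rw [him]; ring
      omega
    have hB : PySem.Int.floordiv (i * (i * i - 1)) 2 = 2 * i * m * (m + 1) := by
      rw [PySem.Int.floordiv_eq_ediv_of_pos (by norm_num)]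
      have heq : i * (i * i - 1) = 2 * (2 * i * m * (m + 1)) := by rw [him]; ring
      rw [heq, Int.mul_ediv_cancel_left _ (by norm_num)]
    have hK2 : ((K / 2 : Nat) : Int) = m := by omega
    rw [hs2, hp, if_neg (by norm_num), if_neg (by norm_num),
        pv_sum_odd i hp K, hK2, hB]

-- ===== VERDICT (by name: the statement is the Claim_ definition above) =====
theorem even_sums_spec : Claim_equal_even_sums := by
  intro n _
  unfold Spec_even_sums even_sums even_sums_alt
  refine PySem.List.foldl_congr_mem _ _ _ 0 ?_
  intro acc i hi
  have h1 : 1 ≤ i := (PySem.List.mem_pyRange_one.mp hi).1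
  exact pv_step_eq i acc h1
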